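-- pv_equiv track=rewrite | github.com/Animenosekai/School-Projects | Python/SNT/Exercices 49 & 50/Exercice 49.py | puitsOrganisation
-- ===== SOURCE A (Python) =====
-- def puitsOrganisation(H):
--     M = 100
--     S = 100
--     N = 0
--     while S<H: #tant que la somme totale n'atteint pas le budget, continuer d'exécuter en boucle
--         M = M + 40
--         S = S + M
--         N = N + 1
--     return(N) #Donner le nombre de mètres que le budget permet de creuser
-- ===== SOURCE B (Python) =====
-- def _isqrt(n):
--     # floor integer square root by Newton's method (n >= 1)
--     x = n
--     while True:
--         y = (x + n // x) // 2
--         if y >= x: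
--             return x
--         x = y
--
-- def puitsOrganisation(H):
--     # After N loop iterations A's sum is 20*N*N + 120*N + 100 = 20*(N+3)**2 - 80,
--     # so the answer is the least N >= 0 with (N+3)**2 >= ceil((H+80)/20).
--     if H <= 100:
--         return 0
--     t = -(-(H + 80) // 20)
--     return _isqrt(t - 1) + 1 - 3
-- ===== Notes on version B (the rewrite author's own statement) =====
-- stated objective: faster
-- what changed: Replaced the iterative accumulation loop by a closed-form solution of the quadratic 20N^2+120N+100 >= H: ceiling division plus a Newton integer square root.
import Mathlib
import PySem

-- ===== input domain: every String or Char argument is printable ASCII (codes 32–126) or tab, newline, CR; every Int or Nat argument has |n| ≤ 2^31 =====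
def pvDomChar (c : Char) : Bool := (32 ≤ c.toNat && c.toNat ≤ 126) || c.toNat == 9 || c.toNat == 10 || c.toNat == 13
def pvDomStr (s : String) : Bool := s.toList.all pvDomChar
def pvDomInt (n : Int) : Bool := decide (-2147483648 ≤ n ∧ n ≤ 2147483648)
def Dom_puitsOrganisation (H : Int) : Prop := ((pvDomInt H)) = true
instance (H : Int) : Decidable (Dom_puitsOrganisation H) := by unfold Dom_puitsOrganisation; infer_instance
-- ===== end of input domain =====

-- B replaces A's O(sqrt(H)) accumulation loop by a closed-form bound: the least N with
-- 20N^2+120N+100 >= H, obtained from a ceiling division and a Newton integer square root.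

-- ===== PORT A =====
-- A's while loop as structural recursion on fuel; (H - 100).toNat iterations always
-- suffice since S grows by at least 140 each pass (the fuel is a totality guard only).
def puitsLoop (fuel : Nat) (H M S N : Int) : Int :=
  match fuel with
  | 0 => N
  | f + 1 =>
    if S < H then puitsLoop f H (M + 40) (S + M + 40) (N + 1) else N

def puitsOrganisation (H : Int) : Int := puitsLoop (H - 100).toNat H 100 100 0

-- ===== PORT B =====
-- Source B's Newton floor-sqrt loop; fuel n.toNat is a totality guard (x strictly decreases).
def newtonLoop (fuel : Nat) (n x : Int) : Int :=
  match fuel with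
  | 0 => x
  | f + 1 =>
    let y := PySem.Int.floordiv (x + PySem.Int.floordiv n x) 2
    if y ≥ x then x else newtonLoop f n y

def puitsOrganisation_alt (H : Int) : Int :=
  if H ≤ 100 then 0
  else
    let t : Int := -(PySem.Int.floordiv (-(H + 80)) 20)
    newtonLoop (t - 1).toNat (t - 1) (t - 1) + 1 - 3

-- ===== PRECONDITION & SPEC =====
def Spec_puitsOrganisation (H : Int) (out : Int) : Prop := out = puitsOrganisation_alt H
instance (H : Int) (out : Int) : Decidable (Spec_puitsOrganisation H out) := by unfold Spec_puitsOrganisation; infer_instance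

-- ===== CLAIM (what is proved, stated in full; the proofs are below) =====
def Claim_equal_puitsOrganisation : Prop := ∀ (H : Int), Dom_puitsOrganisation H → Spec_puitsOrganisation H (puitsOrganisation H)

-- ===== LEMMAS AND PROOFS =====

-- "R is the answer for budget H, seen from iteration N": the series sum 20k²+120k+100
-- first reaches H at k = R, among k ≥ N.
def GoodFrom (H N R : Int) : Prop :=
  H ≤ 20 * R * R + 120 * R + 100 ∧ N ≤ R ∧
    ∀ k : Int, N ≤ k → k < R → 20 * k * k + 120 * k + 100 < H

theorem goodFrom_unique {H R1 R2 : Int} (h1 : GoodFrom H 0 R1) (h2 : GoodFrom H 0 R2) :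
    R1 = R2 := by
  obtain ⟨hr1, hn1, hlt1⟩ := h1
  obtain ⟨hr2, hn2, hlt2⟩ := h2
  by_contra hne
  rcases lt_or_gt_of_ne hne with h | h
  · exact absurd hr1 (not_le.mpr (hlt2 R1 hn1 h))
  · exact absurd hr2 (not_le.mpr (hlt1 R2 hn2 h))

theorem puitsLoop_good (fuel : Nat) :
    ∀ H N : Int, 0 ≤ N → (H - (20 * N * N + 120 * N + 100)).toNat ≤ fuel →
      GoodFrom H N (puitsLoop fuel H (100 + 40 * N) (20 * N * N + 120 * N + 100) N) := by
  induction fuel with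
  | zero =>
    intro H N hN hfuel
    simp only [puitsLoop]
    exact ⟨by omega, le_refl N, fun k hk1 hk2 => by omega⟩
  | succ f ih =>
    intro H N hN hfuel
    rw [puitsLoop]
    by_cases hS : 20 * N * N + 120 * N + 100 < H
    · rw [if_pos hS]
      have e1 : 100 + 40 * N + 40 = 100 + 40 * (N + 1) := by ring
      have e2 : 20 * N * N + 120 * N + 100 + (100 + 40 * N) + 40
          = 20 * (N + 1) * (N + 1) + 120 * (N + 1) + 100 := by ring
      have hfuel' : (H - (20 * (N + 1) * (N + 1) + 120 * (N + 1) + 100)).toNat ≤ f := by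
        rw [← e2]
        have h40 : 0 ≤ 40 * N := by omega
        omega
      have hres := ih H (N + 1) (by omega) hfuel'
      rw [e1, e2]
      obtain ⟨hr, hn, hlt⟩ := hres
      refine ⟨hr, by omega, fun k hk1 hk2 => ?_⟩
      rcases eq_or_lt_of_le hk1 with h | h
      · simpa [← h] using hS
      · exact hlt k (by omega) hk2
    · rw [if_neg hS]
      exact ⟨by omega, le_refl N, fun k hk1 hk2 => by omega⟩

-- Integer AM–GM: for x ≥ 1 and any s ≥ 0 with s² ≤ n, Newton's update (x + n//x)//2 is ≥ s.
theorem newton_ge (n x s : Int) (hx : 1 ≤ x) (_hs : 0 ≤ s) (hsn : s * s ≤ n) :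
    s ≤ PySem.Int.floordiv (x + PySem.Int.floordiv n x) 2 := by
  have hx0 : (0 : Int) < x := by omega
  have hdm := PySem.Int.floordiv_mul_add_mod n x
  have hm0 := PySem.Int.mod_nonneg n hx0
  have hm1 := PySem.Int.mod_lt n hx0
  set q := PySem.Int.floordiv n x with hq
  set m := PySem.Int.mod n x with hm
  have key : 2 * s ≤ x + q := by
    by_contra hcon
    push Not at hcon
    have h1 : x + q + 1 - 2 * s ≤ 0 := by omega
    have h2 : x * (x + q + 1 - 2 * s) ≤ 0 :=
      mul_nonpos_of_nonneg_of_nonpos (by omega) h1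
    nlinarith [sq_nonneg (x - s)]
  rw [PySem.Int.le_floordiv_iff_mul_le (by norm_num)]
  omega

theorem newton_good (fuel : Nat) :
    ∀ n x : Int, 1 ≤ n → 1 ≤ x → x.toNat ≤ fuel → n < (x + 1) * (x + 1) →
      (newtonLoop fuel n x) * (newtonLoop fuel n x) ≤ n ∧
        n < (newtonLoop fuel n x + 1) * (newtonLoop fuel n x + 1) ∧
        1 ≤ newtonLoop fuel n x := by
  induction fuel with
  | zero => intro n x _ hx hfuel _; omega
  | succ f ih =>
    intro n x hn hx hfuel hinv
    rw [newtonLoop]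
    set y := PySem.Int.floordiv (x + PySem.Int.floordiv n x) 2 with hy
    by_cases hge : y ≥ x
    · rw [if_pos hge]
      -- termination case: x ≤ (x + n//x)//2 forces x² ≤ n
      have hx0 : (0 : Int) < x := by omega
      have hdm := PySem.Int.floordiv_mul_add_mod n x
      have hm0 := PySem.Int.mod_nonneg n hx0
      have hxq : x * 2 ≤ x + PySem.Int.floordiv n x := by
        rw [← PySem.Int.le_floordiv_iff_mul_le (by norm_num)]
        exact hge
      have hxle : x ≤ PySem.Int.floordiv n x := by omega
      have : x * x ≤ x * PySem.Int.floordiv n x :=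
        mul_le_mul_of_nonneg_left hxle (by omega)
      exact ⟨by nlinarith, hinv, hx⟩
    · rw [if_neg hge]
      push Not at hge
      have hy1 : 1 ≤ y := newton_ge n x 1 hx (by norm_num) (by omega)
      have hinv' : n < (y + 1) * (y + 1) := by
        by_contra hcon
        push Not at hcon
        have := newton_ge n x (y + 1) hx (by omega) hcon
        omega
      exact ih n y hn hy1 (by omega) hinv'

theorem alt_good (H : Int) : GoodFrom H 0 (puitsOrganisation_alt H) := by
  unfold puitsOrganisation_alt
  by_cases h100 : H ≤ 100
  · rw [if_pos h100]
    exact ⟨by omega, le_refl 0, fun k hk1 hk2 => by omega⟩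
  · rw [if_neg h100]
    push Not at h100
    set t : Int := -(PySem.Int.floordiv (-(H + 80)) 20) with ht
    -- t = ceil((H+80)/20): 20(t-1) < H+80 ≤ 20t
    have hdm := PySem.Int.floordiv_mul_add_mod (-(H + 80)) 20
    have hm0 := PySem.Int.mod_nonneg (-(H + 80)) (by norm_num : (0:Int) < 20)
    have hm1 := PySem.Int.mod_lt (-(H + 80)) (by norm_num : (0:Int) < 20)
    have hceil : 20 * (t - 1) < H + 80 ∧ H + 80 ≤ 20 * t := by
      constructor <;> omega
    have ht10 : 10 ≤ t := by omega
    have hR := newton_good (t - 1).toNat (t - 1) (t - 1) (by omega) (by omega)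
      (le_refl _) (by nlinarith)
    set R := newtonLoop (t - 1).toNat (t - 1) (t - 1) with hRdef
    obtain ⟨hR1, hR2, hR3⟩ := hR
    -- R = floor sqrt(t-1); the answer is R + 1 - 3 = R - 2
    have hR4 : 3 ≤ R := by nlinarith
    show GoodFrom H 0 (R + 1 - 3)
    refine ⟨?_, by omega, fun k hk1 hk2 => ?_⟩
    · -- H ≤ s(R-2): (R+1)² ≥ t hence 20(R+1)² - 80 ≥ H
      have htR : t ≤ (R + 1) * (R + 1) := by omega
      nlinarith
    · -- k < R - 2 ⇒ (k+3)² ≤ R² ≤ t-1 < t ⇒ s(k) < H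
      have hk3 : 0 ≤ k + 3 := by omega
      have hkR : k + 3 ≤ R := by omega
      have : (k + 3) * (k + 3) ≤ R * R := by nlinarith
      nlinarith

-- ===== VERDICT (by name: the statement is the Claim_ definition above) =====
theorem puitsOrganisation_spec : Claim_equal_puitsOrganisation := by
  intro H _
  unfold Spec_puitsOrganisation
  have hA : GoodFrom H 0 (puitsOrganisation H) := by
    have := puitsLoop_good (H - 100).toNat H 0 (le_refl 0) (by norm_num)
    simpa [puitsOrganisation] using this
  exact goodFrom_unique hA (alt_good H)
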